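-- pv_equiv track=rewrite | github.com/Manish-909/hacktoberfest-kickstarter | services/github_service.py | _calculate_hacktoberfest_score
-- ===== SOURCE A (Python) =====
-- from typing import List, Dict, Optional
--
-- def _calculate_hacktoberfest_score(labels: List[str], repo_name: str) -> int:
--     """Calculate how relevant this issue is for Hacktoberfest"""
--
--     score = 0
--     labels_lower = [label.lower() for label in labels]
--
--     # Direct Hacktoberfest labels
--     if any('hacktoberfest' in label for label in labels_lower):
--         score += 10
--     if 'hacktoberfest2025' in labels_lower:
--         score += 15
--     if 'hacktoberfest-accepted' in labels_lower:
--         score += 12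
--
--     # Beginner-friendly labels
--     if 'good first issue' in labels_lower:
--         score += 8
--     if any(term in labels_lower for term in ['beginner-friendly', 'easy', 'starter']):
--         score += 6
--     if 'first-timers-only' in labels_lower:
--         score += 7
--
--     # General contribution labels
--     if 'help wanted' in labels_lower:
--         score += 5
--     if any(term in labels_lower for term in ['documentation', 'docs']):
--         score += 4
--
--     # Repository name bonus
--     if 'hacktoberfest' in repo_name.lower():
--         score += 8
--
--     return min(score, 20)  # Cap at 20
-- ===== SOURCE B (Python) =====
-- def _calculate_hacktoberfest_score(labels, repo_name):
--     """Calculate how relevant this issue is for Hacktoberfest (single pass with flags)"""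
--     sub_hf = f2025 = facc = fgfi = fbeg = ffto = fhw = fdoc = False
--     for raw in labels:
--         l = raw.lower()
--         if 'hacktoberfest' in l:
--             sub_hf = True
--         if l == 'hacktoberfest2025':
--             f2025 = True
--         if l == 'hacktoberfest-accepted':
--             facc = True
--         if l == 'good first issue':
--             fgfi = True
--         if l in ('beginner-friendly', 'easy', 'starter'):
--             fbeg = True
--         if l == 'first-timers-only':
--             ffto = True
--         if l == 'help wanted':
--             fhw = True
--         if l in ('documentation', 'docs'):
--             fdoc = True
--     score = (10 * sub_hf + 15 * f2025 + 12 * facc + 8 * fgfi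
--              + 6 * fbeg + 7 * ffto + 5 * fhw + 4 * fdoc
--              + 8 * ('hacktoberfest' in repo_name.lower()))
--     return min(score, 20)
-- ===== Notes on version B (the rewrite author's own statement) =====
-- stated objective: alternative
-- what changed: Replaces A's nine separate scans over the lowercased label list (one per scoring rule, plus extra passes inside the any(...) membership tests) with a single pass that lowercases each label once and maintains eight boolean flags, summing the weights afterwards.
import Mathlib
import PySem

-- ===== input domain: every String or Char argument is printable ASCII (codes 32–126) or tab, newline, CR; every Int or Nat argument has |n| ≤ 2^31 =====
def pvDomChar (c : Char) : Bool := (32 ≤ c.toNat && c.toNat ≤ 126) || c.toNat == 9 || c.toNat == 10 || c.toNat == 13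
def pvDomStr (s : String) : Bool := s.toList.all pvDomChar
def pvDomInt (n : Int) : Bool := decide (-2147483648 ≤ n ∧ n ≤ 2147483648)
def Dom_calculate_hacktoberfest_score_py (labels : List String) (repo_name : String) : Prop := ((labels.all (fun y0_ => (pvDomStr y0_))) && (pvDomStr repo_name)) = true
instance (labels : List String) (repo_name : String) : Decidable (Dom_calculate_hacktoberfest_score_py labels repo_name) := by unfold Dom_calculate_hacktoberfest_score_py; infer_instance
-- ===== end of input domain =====

-- B replaces A's nine separate scans over the lowercased label list with a single pass
-- keeping eight boolean flags; weights are summed afterwards (same values, same cap).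

-- ===== PORT A =====
-- Literal port of A: lowercase list first, then a chain of membership/any tests with score +=, capped at 20.
def calculate_hacktoberfest_score_py (labels : List String) (repo_name : String) : Int :=
  let score : Int := 0
  let labels_lower := labels.map (fun label => PySem.Str.lower label)
  let score := if labels_lower.any (fun label => PySem.Str.isIn "hacktoberfest" label) then score + 10 else score
  let score := if labels_lower.contains "hacktoberfest2025" then score + 15 else score
  let score := if labels_lower.contains "hacktoberfest-accepted" then score + 12 else score
  let score := if labels_lower.contains "good first issue" then score + 8 else score
  let score := if ["beginner-friendly", "easy", "starter"].any (fun term => labels_lower.contains term) then score + 6 else score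
  let score := if labels_lower.contains "first-timers-only" then score + 7 else score
  let score := if labels_lower.contains "help wanted" then score + 5 else score
  let score := if ["documentation", "docs"].any (fun term => labels_lower.contains term) then score + 4 else score
  let score := if PySem.Str.isIn "hacktoberfest" (PySem.Str.lower repo_name) then score + 8 else score
  min score 20

-- ===== PORT B =====
-- B-side: one fold over the labels maintaining eight boolean flags (each label lowercased once).
def pvFlags := Bool × Bool × Bool × Bool × Bool × Bool × Bool × Bool

def pvStep (st : pvFlags) (raw : String) : pvFlags :=
  let l := PySem.Str.lower raw
  (st.1 || PySem.Str.isIn "hacktoberfest" l,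
   st.2.1 || "hacktoberfest2025" == l,
   st.2.2.1 || "hacktoberfest-accepted" == l,
   st.2.2.2.1 || "good first issue" == l,
   st.2.2.2.2.1 || ("beginner-friendly" == l || ("easy" == l || "starter" == l)),
   st.2.2.2.2.2.1 || "first-timers-only" == l,
   st.2.2.2.2.2.2.1 || "help wanted" == l,
   st.2.2.2.2.2.2.2 || ("documentation" == l || "docs" == l))

def calculate_hacktoberfest_score_py_alt (labels : List String) (repo_name : String) : Int :=
  let f := labels.foldl pvStep (false, false, false, false, false, false, false, false)
  let score : Int :=
    (if f.1 then 10 else 0) + (if f.2.1 then 15 else 0) + (if f.2.2.1 then 12 else 0) +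
    (if f.2.2.2.1 then 8 else 0) + (if f.2.2.2.2.1 then 6 else 0) + (if f.2.2.2.2.2.1 then 7 else 0) +
    (if f.2.2.2.2.2.2.1 then 5 else 0) + (if f.2.2.2.2.2.2.2 then 4 else 0) +
    (if PySem.Str.isIn "hacktoberfest" (PySem.Str.lower repo_name) then 8 else 0)
  min score 20

-- ===== PRECONDITION & SPEC =====
def Spec_calculate_hacktoberfest_score_py (labels : List String) (repo_name : String) (out : Int) : Prop := out = calculate_hacktoberfest_score_py_alt labels repo_name
instance (labels : List String) (repo_name : String) (out : Int) : Decidable (Spec_calculate_hacktoberfest_score_py labels repo_name out) := by unfold Spec_calculate_hacktoberfest_score_py; infer_instance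

-- ===== CLAIM (what is proved, stated in full; the proofs are below) =====
def Claim_equal_calculate_hacktoberfest_score_py : Prop := ∀ (labels : List String) (repo_name : String), Dom_calculate_hacktoberfest_score_py labels repo_name → Spec_calculate_hacktoberfest_score_py labels repo_name (calculate_hacktoberfest_score_py labels repo_name)

-- ===== LEMMAS AND PROOFS =====
-- characterisation of the flag fold
theorem pvStep_foldl (labels : List String) (st : pvFlags) :
    labels.foldl pvStep st =
      (st.1 || (labels.map (fun l => PySem.Str.lower l)).any (fun l => PySem.Str.isIn "hacktoberfest" l),
       st.2.1 || (labels.map (fun l => PySem.Str.lower l)).contains "hacktoberfest2025",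
       st.2.2.1 || (labels.map (fun l => PySem.Str.lower l)).contains "hacktoberfest-accepted",
       st.2.2.2.1 || (labels.map (fun l => PySem.Str.lower l)).contains "good first issue",
       st.2.2.2.2.1 || (labels.map (fun l => PySem.Str.lower l)).any
         (fun l => "beginner-friendly" == l || ("easy" == l || "starter" == l)),
       st.2.2.2.2.2.1 || (labels.map (fun l => PySem.Str.lower l)).contains "first-timers-only",
       st.2.2.2.2.2.2.1 || (labels.map (fun l => PySem.Str.lower l)).contains "help wanted",
       st.2.2.2.2.2.2.2 || (labels.map (fun l => PySem.Str.lower l)).any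
         (fun l => "documentation" == l || "docs" == l)) := by
  induction labels generalizing st with
  | nil => simp
  | cons x xs ih =>
    simp only [List.foldl_cons, ih, List.map_cons, List.any_cons, List.contains_cons, pvStep]
    simp [Bool.or_assoc]

-- A's fixed-term any over the label list equals a per-label disjunction test
theorem pv_tri (a b c : String) (ll : List String) :
    ([a, b, c].any fun term => ll.contains term) =
      ll.any (fun l => a == l || (b == l || c == l)) := by
  induction ll with
  | nil => simp
  | cons x xs ih =>
    simp only [List.any_cons, List.contains_cons, List.any_nil, Bool.or_false] at *
    cases ha : a == x <;> cases hb : b == x <;> cases hc : c == x <;>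
      simp_all

theorem pv_duo (a b : String) (ll : List String) :
    ([a, b].any fun term => ll.contains term) = ll.any (fun l => a == l || b == l) := by
  induction ll with
  | nil => simp
  | cons x xs ih =>
    simp only [List.any_cons, List.contains_cons, List.any_nil, Bool.or_false] at *
    cases ha : a == x <;> cases hb : b == x <;> simp_all

-- ===== VERDICT (by name: the statement is the Claim_ definition above) =====
theorem pv_bridge (c1 c2 c3 c4 c5 c6 c7 c8 c9 : Bool) :
    (let score : Int := 0
     let score := if c1 then score + 10 else score
     let score := if c2 then score + 15 else score
     let score := if c3 then score + 12 else score
     let score := if c4 then score + 8 else score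
     let score := if c5 then score + 6 else score
     let score := if c6 then score + 7 else score
     let score := if c7 then score + 5 else score
     let score := if c8 then score + 4 else score
     let score := if c9 then score + 8 else score
     min score 20) =
    (let score : Int :=
       (if c1 then 10 else 0) + (if c2 then 15 else 0) + (if c3 then 12 else 0) +
       (if c4 then 8 else 0) + (if c5 then 6 else 0) + (if c6 then 7 else 0) +
       (if c7 then 5 else 0) + (if c8 then 4 else 0) + (if c9 then 8 else 0)
     min score 20) := by
  cases c1 <;> cases c2 <;> cases c3 <;> cases c4 <;> cases c5 <;> cases c6 <;>
    cases c7 <;> cases c8 <;> cases c9 <;> rfl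

-- ===== VERDICT (by name: the statement is the Claim_ definition above) =====
theorem calculate_hacktoberfest_score_py_spec : Claim_equal_calculate_hacktoberfest_score_py := by
  intro labels repo_name _
  show _ = _
  have hB : calculate_hacktoberfest_score_py_alt labels repo_name =
      (let score : Int :=
        (if (labels.map (fun l => PySem.Str.lower l)).any (fun l => PySem.Str.isIn "hacktoberfest" l) then 10 else 0) +
        (if (labels.map (fun l => PySem.Str.lower l)).contains "hacktoberfest2025" then 15 else 0) +
        (if (labels.map (fun l => PySem.Str.lower l)).contains "hacktoberfest-accepted" then 12 else 0) +
        (if (labels.map (fun l => PySem.Str.lower l)).contains "good first issue" then 8 else 0) +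
        (if (labels.map (fun l => PySem.Str.lower l)).any
              (fun l => "beginner-friendly" == l || ("easy" == l || "starter" == l)) then 6 else 0) +
        (if (labels.map (fun l => PySem.Str.lower l)).contains "first-timers-only" then 7 else 0) +
        (if (labels.map (fun l => PySem.Str.lower l)).contains "help wanted" then 5 else 0) +
        (if (labels.map (fun l => PySem.Str.lower l)).any
              (fun l => "documentation" == l || "docs" == l) then 4 else 0) +
        (if PySem.Str.isIn "hacktoberfest" (PySem.Str.lower repo_name) then 8 else 0)
       min score 20) := by
    unfold calculate_hacktoberfest_score_py_alt
    rw [pvStep_foldl]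
    rfl
  rw [hB,
    ← pv_tri "beginner-friendly" "easy" "starter" (labels.map (fun l => PySem.Str.lower l)),
    ← pv_duo "documentation" "docs" (labels.map (fun l => PySem.Str.lower l))]
  exact pv_bridge _ _ _ _ _ _ _ _ _
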